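-- pv_equiv track=rewrite | github.com/M-Chimiste/DocForge | examples/plugins/docforge-markdown-renderer/docforge_markdown_renderer/renderer.py | _strip_heading
-- ===== SOURCE A (Python) =====
-- def _strip_heading(line: str) -> tuple[str, int]:
--     """Return ``(text, level)`` for Markdown headings (``# …`` through ``### …``).
--
--     Non-heading lines return ``(line, 0)``.
--     """
--     stripped = line.lstrip()
--     level = 0
--     while level < len(stripped) and stripped[level] == "#":
--         level += 1
--     if level > 0 and level < len(stripped) and stripped[level] == " ":
--         return stripped[level + 1 :], min(level, 3)
--     return line, 0
-- ===== SOURCE B (Python) =====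
-- import re
--
-- _HEADING_RE = re.compile(r"(#+) (.*)", re.S)
--
--
-- def _strip_heading(line: str) -> tuple[str, int]:
--     """Return ``(text, level)`` for Markdown headings (``# …`` through ``### …``).
--
--     Non-heading lines return ``(line, 0)``.
--     """
--     m = _HEADING_RE.match(line.lstrip())
--     if m:
--         return m.group(2), min(len(m.group(1)), 3)
--     return line, 0
-- ===== Notes on version B (the rewrite author's own statement) =====
-- stated objective: idiomatic
-- what changed: Replaced the manual index-based while-loop prefix scan and slice with a single precompiled DOTALL regex match of a hash-run group, a literal space, and a rest group on the lstripped line, reading text and level from the match groups.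
import Mathlib
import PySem

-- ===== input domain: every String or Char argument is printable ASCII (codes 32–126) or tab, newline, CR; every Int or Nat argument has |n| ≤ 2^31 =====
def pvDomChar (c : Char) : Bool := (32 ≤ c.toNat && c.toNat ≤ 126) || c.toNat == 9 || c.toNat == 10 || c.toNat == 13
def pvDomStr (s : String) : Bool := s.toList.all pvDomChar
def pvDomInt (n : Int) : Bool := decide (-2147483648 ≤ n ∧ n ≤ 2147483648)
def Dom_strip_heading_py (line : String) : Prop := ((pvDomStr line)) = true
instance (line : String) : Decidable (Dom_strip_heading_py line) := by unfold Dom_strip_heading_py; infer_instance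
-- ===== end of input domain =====

-- B replaces A's manual index-based '#'-prefix while loop and slice with a regex match
-- '(#+) (.*)' (DOTALL) on the lstripped line (idiomatic; same return value everywhere).

-- ===== PORT A =====
-- the 'while level < len(stripped) and stripped[level] == "#"' loop: counts leading '#'
def pvALoop : List Char → Nat
  | [] => 0
  | c :: rest => if c = '#' then pvALoop rest + 1 else 0

def strip_heading_py (line : String) : String × Int :=
  let stripped := PySem.Chars.lstrip line.toList
  let level := pvALoop stripped
  if 0 < level ∧ (level : Int) < (stripped.length : Int) ∧
      PySem.List.pyGet? stripped (level : Int) = some ' ' then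
    (String.ofList (PySem.List.slice stripped (some ((level : Int) + 1)) none), min (level : Int) 3)
  else
    (line, 0)

-- ===== PORT B =====
-- regex '(#+) (.*)' with DOTALL, anchored at the start: group 1 = maximal nonempty run of
-- '#' (takeWhile), then a literal space, group 2 = everything after it.
def strip_heading_py_alt (line : String) : String × Int :=
  let stripped := PySem.Chars.lstrip line.toList
  match stripped.takeWhile (· == '#'), stripped.dropWhile (· == '#') with
  | _ :: _, ' ' :: tail =>
      (String.ofList tail, min ((stripped.takeWhile (· == '#')).length : Int) 3)
  | _, _ => (line, 0)

-- ===== PRECONDITION & SPEC =====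
def Spec_strip_heading_py (line : String) (out : String × Int) : Prop := out = strip_heading_py_alt line
instance (line : String) (out : String × Int) : Decidable (Spec_strip_heading_py line out) := by unfold Spec_strip_heading_py; infer_instance

-- ===== CLAIM (what is proved, stated in full; the proofs are below) =====
def Claim_equal_strip_heading_py : Prop := ∀ (line : String), Dom_strip_heading_py line → Spec_strip_heading_py line (strip_heading_py line)

-- ===== LEMMAS AND PROOFS =====

lemma pvALoop_eq_takeWhile (cs : List Char) :
    pvALoop cs = (cs.takeWhile (· == '#')).length := by
  induction cs with
  | nil => rfl
  | cons c rest ih =>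
      by_cases h : c = '#' <;> simp [pvALoop, h, ih]

lemma pv_core (line : String) (cs : List Char) :
    (let level := pvALoop cs
     if 0 < level ∧ (level : Int) < (cs.length : Int) ∧
         PySem.List.pyGet? cs (level : Int) = some ' ' then
       (String.ofList (PySem.List.slice cs (some ((level : Int) + 1)) none), min (level : Int) 3)
     else (line, 0))
    = (match cs.takeWhile (· == '#'), cs.dropWhile (· == '#') with
       | _ :: _, ' ' :: tail =>
           (String.ofList tail, min ((cs.takeWhile (· == '#')).length : Int) 3)
       | _, _ => (line, 0)) := by
  have hsplit := cs.takeWhile_append_dropWhile (p := (· == '#'))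
  set t := cs.takeWhile (· == '#') with ht
  set d := cs.dropWhile (· == '#') with hd
  have hlevel : pvALoop cs = t.length := pvALoop_eq_takeWhile cs
  have hcs : cs = t ++ d := hsplit.symm
  have hget : PySem.List.pyGet? cs ((t.length : Nat) : Int) = d.head? := by
    rw [PySem.List.pyGet?_natCast, hcs]
    cases d with
    | nil => simp
    | cons x xs => simp
  have hslice : PySem.List.slice cs (some (((t.length : Nat) : Int) + 1)) none = d.tail := by
    have h1 : ((t.length : Nat) : Int) + 1 = (((t.length + 1 : Nat)) : Int) := by push_cast; ring
    rw [h1, PySem.List.slice_from_natCast, hcs]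
    cases d with
    | nil => simp
    | cons x xs =>
        rw [show t ++ x :: xs = (t ++ [x]) ++ xs by simp,
            show t.length + 1 = (t ++ [x]).length by simp, List.drop_left]
        rfl
  have hlen : cs.length = t.length + d.length := by rw [hcs]; simp
  simp only [hlevel]
  cases htc : t with
  | nil => simp
  | cons a as =>
      cases hdc : d with
      | nil =>
          have hF : ¬(((as.length : Int) + 1) < (cs.length : Int)) := by
            rw [hlen, htc, hdc]; push_cast [List.length_cons, List.length_nil]; omega
          simp
          intro h1 _
          exact absurd h1 hF
      | cons x xs =>
          rw [htc] at hget hslice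
          by_cases hx : x = ' '
          · have hcond : 0 < (a :: as).length ∧ ((a :: as).length : Int) < (cs.length : Int) ∧
                PySem.List.pyGet? cs (((a :: as).length : Nat) : Int) = some ' ' := by
              refine ⟨by simp, ?_, ?_⟩
              · rw [hlen, htc, hdc]; push_cast [List.length_cons, List.length_nil]; omega
              · rw [hget, hdc, hx]; rfl
            rw [if_pos hcond, hslice, hdc, hx]
            rfl
          · have hcond : ¬(0 < (a :: as).length ∧ ((a :: as).length : Int) < (cs.length : Int) ∧
                PySem.List.pyGet? cs (((a :: as).length : Nat) : Int) = some ' ') := by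
              intro ⟨_, _, hg⟩
              rw [hget, hdc] at hg
              simp at hg
              exact hx hg
            rw [if_neg hcond]
            split
            · rename_i heq1 heq2
              injection heq2 with h _
              exact absurd h hx
            · rfl

-- ===== VERDICT (by name: the statement is the Claim_ definition above) =====
theorem strip_heading_py_spec : Claim_equal_strip_heading_py := by
  intro line _
  unfold Spec_strip_heading_py strip_heading_py strip_heading_py_alt
  exact pv_core line (PySem.Chars.lstrip line.toList)
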